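-- pv_equiv track=rewrite | github.com/blakej2432/Algorithm-study | TeamCode/algo_79.py | solution
-- ===== SOURCE A (Python) =====
-- dict = {10:'A', 11:'B', 12:'C', 13:'D', 14:'E', 15:'F'}
--
-- def arith(n, q):
--     rev_base = ''
--
--     while n > 0:
--         n, mod = divmod(n, q)
--         rev_base += dict[mod] if mod in dict.keys() else str(mod)
--     return rev_base[::-1]
--
-- def solution(n, t, m, p):
--     i = 0
--     num = '0'
--     result = ''
--     while len(result) < t:
--
--         num += arith(i, n)
--         result = num[p-1::m]
--         i += 1
--     return result[0:t]
-- ===== SOURCE B (Python) =====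
-- BASE_CHARS = {10: 'A', 11: 'B', 12: 'C', 13: 'D', 14: 'E', 15: 'F'}
--
-- def _repr(i, n):
--     # base-n representation of i ('0' for i == 0)
--     if i == 0:
--         return '0'
--     out = []
--     while i > 0:
--         i, d = divmod(i, n)
--         out.append(BASE_CHARS.get(d, str(d)))
--     return ''.join(out)[::-1]
--
-- def solution(n, t, m, p):
--     # Stream the base-n representations of 0, 1, 2, ... one character at a time,
--     # keeping exactly the characters whose global position is p-1, p-1+m, ...;
--     # no concatenated string is ever built and nothing is sliced.
--     out = []
--     pos = 0
--     i = 0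
--     while len(out) < t:
--         for c in _repr(i, n):
--             if pos >= p - 1 and (pos - (p - 1)) % m == 0:
--                 out.append(c)
--             pos += 1
--         i += 1
--     return ''.join(out[:t])
-- ===== Notes on version B (the rewrite author's own statement) =====
-- stated objective: faster
-- what changed: B never builds the concatenated string and never slices: it streams the base-n representations of 0,1,2,... one character at a time with a running position counter and keeps exactly the characters at global positions p-1, p-1+m, ..., whereas A grows the whole string and re-slices all of it on every iteration.
-- outside the precondition, e.g. on solution(2, 3, 1, -2): A returns '110', B returns '011'; on solution(3, 2, -1, 2): A returns '10', B returns '12'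
import Mathlib
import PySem

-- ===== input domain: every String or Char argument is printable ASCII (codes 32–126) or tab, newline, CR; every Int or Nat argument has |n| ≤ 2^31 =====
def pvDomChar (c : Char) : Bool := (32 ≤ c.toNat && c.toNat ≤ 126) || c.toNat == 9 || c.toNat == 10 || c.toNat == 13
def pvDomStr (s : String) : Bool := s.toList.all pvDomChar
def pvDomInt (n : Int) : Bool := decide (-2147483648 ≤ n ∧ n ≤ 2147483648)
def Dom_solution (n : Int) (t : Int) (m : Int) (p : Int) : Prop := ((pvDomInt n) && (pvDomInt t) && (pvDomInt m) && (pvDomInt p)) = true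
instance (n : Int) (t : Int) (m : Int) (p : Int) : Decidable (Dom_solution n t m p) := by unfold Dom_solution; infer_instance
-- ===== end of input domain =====

-- B streams the base-n digits one character at a time with a running position counter,
-- keeping exactly the characters at positions p-1, p-1+m, …: it never builds the
-- concatenated string and never slices; a timing run measured it faster.

-- ===== PORT A =====
-- the module-level dict {10:'A', …, 15:'F'}
def pvDictA : PySem.Dict Int (List Char) :=
  PySem.Dict.ofList [(10, ['A']), (11, ['B']), (12, ['C']), (13, ['D']), (14, ['E']), (15, ['F'])]

-- `dict[mod] if mod in dict.keys() else str(mod)`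
def pvDigitA (d : Int) : List Char :=
  match PySem.Dict.get? pvDictA d with
  | some v => v
  | none => PySem.Int.toChars d

-- `while n > 0: n, mod = divmod(n, q); rev_base += …`; fuel n.toNat+1 covers every
-- terminating run (q ≥ 2 halves n each step); on fuel exhaustion Python would not return.
def arithLoopA (q : Int) : Nat → Int → List Char → List Char
  | 0, _, acc => acc
  | f + 1, nn, acc =>
    if 0 < nn then
      arithLoopA q f (PySem.Int.floordiv nn q) (acc ++ pvDigitA (PySem.Int.mod nn q))
    else acc

-- `return rev_base[::-1]`
def arithA (nn q : Int) : List Char :=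
  (PySem.List.slice? (arithLoopA q (nn.toNat + 1) nn []) none none (-1)).getD []

-- `num[p-1::m]`, ported by hand with CPython's positive-step slice formula (start
-- clamped to the length, then indices start, start+m, …): exact for 0 ≤ p-1 and 0 < m,
-- which Pre_ guarantees whenever the slice is reached (proved equal to PySem.List.slice?
-- in pySliceA_eq below); num is kept as an Array Char only so that the indexing is O(1).
def pySliceA (s : Array Char) (a m : Int) : List Char :=
  (List.range
      (if min a (s.size : Int) < (s.size : Int) then
        (((s.size : Int) - min a (s.size : Int) + m - 1) / m).toNat
      else 0)).filterMap
    (fun (k : Nat) => s[(min a (s.size : Int) + m * (k : Int)).toNat]?)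

-- `while len(result) < t: num += arith(i, n); result = num[p-1::m]; i += 1`
def solLoopA (n t m p : Int) : Nat → Int → Array Char → List Char → List Char
  | 0, _, _, result => result
  | f + 1, i, num, result =>
    if (result.length : Int) < t then
      let num' := num ++ (arithA i n).toArray
      solLoopA n t m p f (i + 1) num' (pySliceA num' (p - 1) m)
    else result

-- fuel (p + m*t).toNat + 3 bounds the iteration count on every input where Python A returns
def solution (n : Int) (t : Int) (m : Int) (p : Int) : String :=
  String.ofList
    (PySem.List.slice (solLoopA n t m p ((p + m * t).toNat + 3) 0 #['0'] []) (some 0) (some t))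

-- ===== PORT B =====
def pvDictB : PySem.Dict Int (List Char) :=
  PySem.Dict.ofList [(10, ['A']), (11, ['B']), (12, ['C']), (13, ['D']), (14, ['E']), (15, ['F'])]

-- `BASE_CHARS.get(d, str(d))`
def pvDigitB (d : Int) : List Char :=
  (PySem.Dict.get? pvDictB d).getD (PySem.Int.toChars d)

-- `while i > 0: i, d = divmod(i, n); out.append(…)`; same fuel policy as A's helper
def chunkLoopB (q : Int) : Nat → Int → List (List Char) → List (List Char)
  | 0, _, out => out
  | f + 1, i, out =>
    if 0 < i then
      chunkLoopB q f (PySem.Int.floordiv i q) (out ++ [pvDigitB (PySem.Int.mod i q)])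
    else out

-- `''.join(out)[::-1]` (the i > 0 branch of _repr)
def chunkB (i q : Int) : List Char :=
  (PySem.List.slice? (PySem.Chars.join [] (chunkLoopB q (i.toNat + 1) i [])) none none (-1)).getD []

-- `_repr(i, n)`: `if i == 0: return '0'` else the loop above
def chunkRepr (i q : Int) : List Char := if i = 0 then ['0'] else chunkB i q

-- body of the `for c in _repr(i, n)` loop: state (out, pos)
def stepB (m p : Int) (st : List Char × Int) (c : Char) : List Char × Int :=
  (if p - 1 ≤ st.2 ∧ PySem.Int.mod (st.2 - (p - 1)) m = 0 then st.1 ++ [c] else st.1,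
   st.2 + 1)

-- `while len(out) < t: for c in _repr(i, n): … ; i += 1`
def solLoopB (n t m p : Int) : Nat → Int → List Char × Int → List Char
  | 0, _, st => st.1
  | f + 1, i, st =>
    if (st.1.length : Int) < t then
      solLoopB n t m p f (i + 1) ((chunkRepr i n).foldl (stepB m p) st)
    else st.1

-- `''.join(out[:t])`
def solution_alt (n : Int) (t : Int) (m : Int) (p : Int) : String :=
  String.ofList
    (PySem.List.slice (solLoopB n t m p ((p + m * t).toNat + 3) 0 ([], 0)) none (some t))

-- ===== PRECONDITION & SPEC =====
-- Pre_ restricts to the task's natural domain (a base n ≥ 2, a slice step m ≥ 1 and a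
-- 1-based position p ≥ 1): outside it Python A mostly diverges (n ≤ 1; m ≤ 0 / p ≤ 0 cap
-- the slice length below t) or raises ZeroDivisionError (n = 0), and where it does return
-- (some m ≤ 0 / p ≤ 0 cases) its value comes from Python's backward/negative-index slicing,
-- which B's forward streaming does not reproduce; for t ≤ 0 every call returns '' and is admitted.
def Pre_solution (n : Int) (t : Int) (m : Int) (p : Int) : Prop :=
  t ≤ 0 ∨ (2 ≤ n ∧ 1 ≤ m ∧ 1 ≤ p)
instance (n : Int) (t : Int) (m : Int) (p : Int) : Decidable (Pre_solution n t m p) := by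
  unfold Pre_solution; infer_instance

def pvWitness_solution : Int × Int × Int × Int := (2, 3, 2, 1)

def Spec_solution (n : Int) (t : Int) (m : Int) (p : Int) (out : String) : Prop :=
  out = solution_alt n t m p
instance (n : Int) (t : Int) (m : Int) (p : Int) (out : String) : Decidable (Spec_solution n t m p out) := by
  unfold Spec_solution; infer_instance

-- ===== CLAIM (what is proved, stated in full; the proofs are below) =====
def Claim_equal_solution : Prop :=
  ∀ (n : Int) (t : Int) (m : Int) (p : Int),
    Dom_solution n t m p → Pre_solution n t m p → Spec_solution n t m p (solution n t m p)

-- ===== LEMMAS AND PROOFS =====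

-- the two digit tables and fallbacks agree
theorem digit_eq (d : Int) : pvDigitA d = pvDigitB d := by
  unfold pvDigitA pvDigitB pvDictA pvDictB
  cases PySem.Dict.get? (PySem.Dict.ofList [(10, ['A']), (11, ['B']), (12, ['C']), (13, ['D']), (14, ['E']), (15, ['F'])]) d <;> rfl

theorem join0 (l : List (List Char)) : PySem.Chars.join [] l = l.flatten := by
  simp only [PySem.Chars.join, List.intercalate]
  induction l with
  | nil => rfl
  | cons x xs ih =>
    cases xs with
    | nil => simp
    | cons y ys => simp_all [List.intersperse]

theorem chunkLoop_join (q : Int) : ∀ (f : Nat) (i : Int) (out : List (List Char)),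
    PySem.Chars.join [] (chunkLoopB q f i out) = arithLoopA q f i (PySem.Chars.join [] out) := by
  intro f
  induction f with
  | zero => intro i out; rfl
  | succ f ih =>
    intro i out
    simp only [chunkLoopB, arithLoopA]
    by_cases h : 0 < i
    · rw [if_pos h, if_pos h, ih, join0, List.flatten_append, ← join0, digit_eq]
      simp [join0]
    · rw [if_neg h, if_neg h]

theorem chunk_eq (i q : Int) : chunkB i q = arithA i q := by
  unfold chunkB arithA
  rw [chunkLoop_join]
  rfl

-- the hand-ported slice agrees with PySem's num[p-1::m] on its stated domain
theorem pySliceA_eq (s : Array Char) (a m : Int) (ha : 0 ≤ a) (hm : 0 < m) :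
    pySliceA s a m = (PySem.List.slice? s.toList (some a) none m).getD [] := by
  unfold pySliceA PySem.List.slice? PySem.List.sliceIndices
  simp only [show (m = 0) = False by simp; omega, show (m < 0) = False by simp; omega,
    show (a < 0) = False by simp; omega, if_false, if_pos hm, Option.getD_some,
    Array.length_toList]
  apply List.filterMap_congr
  intro k _
  exact (Array.getElem?_toList).symm

-- the selected characters: num[p-1::m] (the value A's loop carries, B's out)
def sliceSel (m p : Int) (s : List Char) : List Char :=
  (PySem.List.slice? s (some (p - 1)) none m).getD []

theorem sliceSel_nil (m p : Int) (hm : 0 < m) (_hp : 1 ≤ p) : sliceSel m p [] = [] := by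
  unfold sliceSel PySem.List.slice?
  simp [show m ≠ 0 by omega]

-- appending one character extends the slice by it exactly when its position is selected
theorem sliceSel_snoc (s : List Char) (c : Char) (m p : Int) (hm : 0 < m) (hp : 1 ≤ p) :
    sliceSel m p (s ++ [c]) =
      sliceSel m p s ++
        (if p - 1 ≤ (s.length : Int) ∧ ((s.length : Int) - (p - 1)) % m = 0 then [c] else []) := by
  unfold sliceSel PySem.List.slice? PySem.List.sliceIndices
  simp only [show (m = 0) = False by simp; omega, show (m < 0) = False by simp; omega,
    show (p - 1 < 0) = False by simp; omega, if_false, if_pos hm, Option.getD_some,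
    List.length_append, List.length_cons, List.length_nil, Nat.cast_add, Nat.cast_one, zero_add]
  set a := p - 1 with hadef
  have ha : 0 ≤ a := by omega
  set L := (s.length : Int) with hLdef
  have hL : 0 ≤ L := by positivity
  by_cases hcase : a ≤ L
  · rw [min_eq_left (by omega : a ≤ L + 1), min_eq_left hcase]
    rw [if_pos (by omega : a < L + 1)]
    have hrc : (if a < L then ((L - a + m - 1) / m).toNat else 0) = ((L - a + m - 1) / m).toNat := by
      by_cases h : a < L
      · rw [if_pos h]
      · rw [if_neg h]
        have h3 : (L - a + m - 1) / m = 0 := by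
          rw [show L - a + m - 1 = m - 1 by omega]
          exact Int.ediv_eq_zero_of_lt (by omega) (by omega)
        rw [h3]; simp
    rw [hrc]
    obtain ⟨q, r, hqr, hr0, hrm, hq0⟩ :
        ∃ q r : Int, L - a = m * q + r ∧ 0 ≤ r ∧ r < m ∧ 0 ≤ q := by
      refine ⟨(L - a) / m, (L - a) % m, ?_, Int.emod_nonneg _ (by omega),
        Int.emod_lt_of_pos _ hm, Int.ediv_nonneg (by omega) (by omega)⟩
      rw [Int.mul_ediv_add_emod]
    have hCr : (L - a + m - 1) / m = q + (r + m - 1) / m := by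
      rw [hqr, show m * q + r + m - 1 = (r + m - 1) + q * m by ring,
        Int.add_mul_ediv_right _ _ (by omega : m ≠ 0)]
      ring
    have hCl : (L + 1 - a + m - 1) / m = q + (r + m) / m := by
      rw [show L + 1 - a + m - 1 = (L - a) + m by ring, hqr,
        show m * q + r + m = (r + m) + q * m by ring, Int.add_mul_ediv_right _ _ (by omega : m ≠ 0)]
      ring
    have hrm1 : (r + m) / m = 1 := by
      rw [show r + m = r + 1 * m by ring, Int.add_mul_ediv_right _ _ (by omega : m ≠ 0),
        Int.ediv_eq_zero_of_lt hr0 hrm]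
      omega
    by_cases hrz : r = 0
    · have hsel : a ≤ L ∧ (L - a) % m = 0 := by
        refine ⟨hcase, ?_⟩
        rw [hqr, hrz, add_zero, Int.mul_emod_right]
      rw [if_pos hsel]
      have h1 : (r + m - 1) / m = 0 := Int.ediv_eq_zero_of_lt (by omega) (by omega)
      have hCr' : ((L - a + m - 1) / m).toNat = q.toNat := by rw [hCr, h1]; omega
      have hCl' : ((L + 1 - a + m - 1) / m).toNat = q.toNat + 1 := by rw [hCl, hrm1]; omega
      rw [hCr', hCl', List.range_succ, List.filterMap_append]
      congr 1
      · apply List.filterMap_congr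
        intro k hk
        rw [List.mem_range] at hk
        have hkq : (k : Int) < q := by omega
        have hmk : m * (k : Int) < m * q := by
          apply mul_lt_mul_of_pos_left hkq hm
        have hmk0 : 0 ≤ m * (k : Int) := by positivity
        have hidx' : (a + m * (k : Int)).toNat < s.length := by omega
        exact List.getElem?_append_left hidx'
      · have hone : (s ++ [c])[(a + m * ((q.toNat : Nat) : Int)).toNat]? = some c := by
          rw [show (a + m * ((q.toNat : Nat) : Int)).toNat = s.length by
            rw [Int.toNat_of_nonneg hq0]; omega]
          exact List.getElem?_concat_length
        simp only [List.filterMap_cons, List.filterMap_nil, hone]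
    · have hnsel : ¬ (a ≤ L ∧ (L - a) % m = 0) := by
        rintro ⟨-, hmod⟩
        rw [hqr, show m * q + r = r + m * q by ring, Int.add_mul_emod_self_left,
          Int.emod_eq_of_lt hr0 hrm] at hmod
        omega
      rw [if_neg hnsel, List.append_nil]
      have h1 : (r + m - 1) / m = 1 := by
        rw [show r + m - 1 = (r - 1) + 1 * m by ring, Int.add_mul_ediv_right _ _ (by omega : m ≠ 0),
          Int.ediv_eq_zero_of_lt (by omega) (by omega)]
        omega
      have hceq : ((L + 1 - a + m - 1) / m).toNat = ((L - a + m - 1) / m).toNat := by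
        rw [hCl, hCr, hrm1, h1]
      rw [hceq]
      apply List.filterMap_congr
      intro k hk
      rw [List.mem_range] at hk
      have hkC : (k : Int) < (L - a + m - 1) / m := by omega
      have hkq : (k : Int) ≤ q := by rw [hCr, h1] at hkC; omega
      have hmk : m * (k : Int) ≤ m * q := by
        apply mul_le_mul_of_nonneg_left hkq (le_of_lt hm)
      have hmk0 : 0 ≤ m * (k : Int) := by positivity
      have hidx' : (a + m * (k : Int)).toNat < s.length := by omega
      exact List.getElem?_append_left hidx'
  · rw [min_eq_right (by omega : L + 1 ≤ a), min_eq_right (by omega : L ≤ a)]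
    rw [if_neg (by omega : ¬ L + 1 < L + 1), if_neg (by omega : ¬ L < L),
      if_neg (by omega : ¬ (a ≤ L ∧ (L - a) % m = 0))]
    simp

-- the for-loop over a chunk keeps the selection invariant
theorem foldl_stepB (m p : Int) (hm : 0 < m) (hp : 1 ≤ p) :
    ∀ (chunk num : List Char),
      chunk.foldl (stepB m p) (sliceSel m p num, (num.length : Int))
        = (sliceSel m p (num ++ chunk), ((num ++ chunk).length : Int)) := by
  intro chunk
  induction chunk with
  | nil => intro num; simp
  | cons c cs ih =>
    intro num
    simp only [List.foldl_cons, stepB]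
    rw [PySem.Int.mod_eq_emod_of_pos hm]
    have h1 : (if p - 1 ≤ (num.length : Int) ∧ ((num.length : Int) - (p - 1)) % m = 0
        then sliceSel m p num ++ [c] else sliceSel m p num) = sliceSel m p (num ++ [c]) := by
      rw [sliceSel_snoc num c m p hm hp]
      split_ifs <;> simp
    have h2 : (num.length : Int) + 1 = (((num ++ [c]).length : Nat) : Int) := by
      simp
    rw [h1, h2, ih (num ++ [c])]
    simp

-- A's loop (carrying the slice of num) and B's loop (carrying out and pos) run in lockstep
theorem lock (n t m p : Int) (hm : 1 ≤ m) (hp : 1 ≤ p) :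
    ∀ (F : Nat) (i : Int), 1 ≤ i → ∀ (num : Array Char),
      solLoopA n t m p F i num (sliceSel m p num.toList)
        = solLoopB n t m p F i (sliceSel m p num.toList, (num.toList.length : Int)) := by
  intro F
  induction F with
  | zero => intro i hi num; rfl
  | succ f ih =>
    intro i hi num
    simp only [solLoopA, solLoopB]
    by_cases h : ((sliceSel m p num.toList).length : Int) < t
    · rw [if_pos h, if_pos h]
      have hch : chunkRepr i n = arithA i n := by
        unfold chunkRepr
        rw [if_neg (by omega : ¬ i = 0), chunk_eq]
      have htl : (num ++ (arithA i n).toArray).toList = num.toList ++ arithA i n := by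
        simp
      rw [hch, foldl_stepB m p (by omega) hp (arithA i n) num.toList,
        pySliceA_eq _ _ _ (by omega) (by omega), ← htl]
      exact ih (i + 1) (by omega) (num ++ (arithA i n).toArray)
    · rw [if_neg h, if_neg h]

theorem arith_zero (q : Int) : arithA 0 q = [] := rfl

-- ===== VERDICT (by name: the statement is the Claim_ definition above) =====
theorem solution_spec : Claim_equal_solution := by
  unfold Claim_equal_solution
  intro n t m p _hdom hpre
  unfold Spec_solution solution solution_alt
  by_cases ht : t ≤ 0
  · have hA : solLoopA n t m p ((p + m * t).toNat + 3) 0 #['0'] [] = [] := by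
      show solLoopA n t m p (((p + m * t).toNat + 2) + 1) 0 #['0'] [] = []
      simp only [solLoopA]
      rw [if_neg (by simp; omega)]
    have hB : solLoopB n t m p ((p + m * t).toNat + 3) 0 ([], 0) = [] := by
      show solLoopB n t m p (((p + m * t).toNat + 2) + 1) 0 ([], 0) = []
      simp only [solLoopB]
      rw [if_neg (by simp; omega)]
    rw [hA, hB]
    simp [PySem.List.slice]
  · rcases hpre with h | ⟨hn, hm, hp⟩
    · omega
    have hm0 : (0 : Int) < m := by omega
    have stepA : solLoopA n t m p ((p + m * t).toNat + 3) 0 #['0'] []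
        = solLoopA n t m p ((p + m * t).toNat + 2) 1 #['0'] (sliceSel m p ['0']) := by
      show solLoopA n t m p (((p + m * t).toNat + 2) + 1) 0 #['0'] [] = _
      simp only [solLoopA]
      rw [if_pos (by simp; omega)]
      have h1 : (#['0'] : Array Char) ++ (arithA 0 n).toArray = #['0'] := by
        rw [arith_zero]; rfl
      rw [h1, pySliceA_eq _ _ _ (by omega) (by omega)]
      rfl
    have stepB1 : solLoopB n t m p ((p + m * t).toNat + 3) 0 ([], 0)
        = solLoopB n t m p ((p + m * t).toNat + 2) 1 (sliceSel m p ['0'], 1) := by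
      show solLoopB n t m p (((p + m * t).toNat + 2) + 1) 0 ([], 0) = _
      simp only [solLoopB]
      rw [if_pos (by simp; omega)]
      have := foldl_stepB m p hm0 hp ['0'] []
      simp only [List.nil_append] at this
      rw [show (([], 0) : List Char × Int) = (sliceSel m p [], ((([] : List Char).length : Nat) : Int)) by
        rw [sliceSel_nil m p hm0 hp]; rfl]
      rw [show chunkRepr 0 n = ['0'] from rfl, this]
      rfl
    have hl := lock n t m p hm hp ((p + m * t).toNat + 2) 1 (by omega) #['0']
    simp only [List.length_cons, List.length_nil, Nat.cast_one, zero_add] at hl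
    rw [stepA, stepB1, hl, PySem.List.slice_zero_start]
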